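-- pv_equiv track=rewrite | github.com/stefanovicn/MultiGraph | TreciDomaciZadatak.py | components_after_removal
-- ===== SOURCE A (Python) =====
-- from collections import Counter, deque
--
-- def neigh_set(adj: dict[int, list[int]], u: int) -> set[int]:
--     return set(adj[u])
--
-- def components_after_removal(adj: dict[int, list[int]], removed: set[int]) -> int:
--     nodes = [u for u in adj if u not in removed]
--     visited = set()
--     comps = 0
--
--     for start in nodes:
--         if start in visited:
--             continue
--         comps += 1
--         q = deque([start])
--         visited.add(start)
--
--         while q:
--             u = q.popleft()
--             for w in neigh_set(adj, u):
--                 if w in removed or w in visited: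
--                     continue
--                 visited.add(w)
--                 q.append(w)
--
--     return comps
-- ===== SOURCE B (Python) =====
-- def components_after_removal(adj: dict[int, list[int]], removed: set[int]) -> int:
--     # Min-label propagation: every surviving key starts with its own discovery
--     # index as label; labels relax along surviving edges until a fixpoint, and
--     # a node heads a component iff it keeps its own label.
--     keys = []
--     idx = {}
--     for u in adj:
--         if u not in removed and u not in idx:
--             idx[u] = len(keys)
--             keys.append(u)
--     n = len(keys)
--     label = list(range(n))
--     changed = True
--     while changed:
--         changed = False
--         for i in range(n):
--             lu = label[i]
--             for w in adj[keys[i]]: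
--                 if w not in removed:
--                     j = idx[w]
--                     if label[j] > lu:
--                         label[j] = lu
--                         changed = True
--     return sum(1 for i in range(n) if label[i] == i)
-- ===== Notes on version B (the rewrite author's own statement) =====
-- stated objective: alternative
-- what changed: Replaces the per-start BFS flood fill (queue + visited set) by min-label propagation: every surviving key starts labelled with its own discovery index, labels relax along surviving edges (Bellman-Ford-style passes) until a fixpoint, and the component count is the number of nodes that keep their own label; the proof shows the fixpoint label of a node is the smallest index of a node reaching it, which matches A's count of starts not reached by any earlier start.
import Mathlib
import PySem

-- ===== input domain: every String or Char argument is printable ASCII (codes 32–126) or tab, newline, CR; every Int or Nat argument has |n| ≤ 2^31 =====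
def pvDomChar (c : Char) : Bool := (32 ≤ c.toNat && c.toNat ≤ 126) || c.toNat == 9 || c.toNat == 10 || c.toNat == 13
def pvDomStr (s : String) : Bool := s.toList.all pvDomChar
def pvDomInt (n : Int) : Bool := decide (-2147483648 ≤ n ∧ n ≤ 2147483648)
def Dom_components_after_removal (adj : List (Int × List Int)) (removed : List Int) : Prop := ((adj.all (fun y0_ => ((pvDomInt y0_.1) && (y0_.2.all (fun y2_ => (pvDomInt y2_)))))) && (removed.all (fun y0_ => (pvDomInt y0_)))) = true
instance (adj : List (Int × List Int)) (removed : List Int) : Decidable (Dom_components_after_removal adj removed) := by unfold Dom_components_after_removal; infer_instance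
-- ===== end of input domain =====

-- B replaces A's per-start BFS flood fill by min-label propagation: every surviving key starts
-- labelled with its own discovery index, labels relax along surviving edges until a fixpoint,
-- and the result is the number of nodes keeping their own label (alternative algorithm).

-- ===== PORT A =====
-- Finite universe of all node ids occurring anywhere in adj; its size bounds the number of worklist
-- pops, so `|universe| + 1` is used as fuel (a pure totality guard for the `while q:` loop).
def pvUniv (adj : List (Int × List Int)) : List Int :=
  PySem.Set.ofList (adj.map Prod.fst ++ (adj.map Prod.snd).flatten)

-- neigh_set(adj, u) = set(adj[u]); Python raises KeyError when u is not a key (excluded by Pre_) —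
-- there the port returns the empty set.
def neigh_set (adj : List (Int × List Int)) (u : Int) : List Int :=
  PySem.Set.ofList (((PySem.Dict.mk adj).get? u).getD [])

-- the `while q:` BFS loop; state = (queue, visited); visited is kept as a duplicate-free list
def bfsLoop (adj : List (Int × List Int)) (removed : List Int) :
    Nat → List Int → List Int → List Int
  | 0, _, visited => visited
  | _ + 1, [], visited => visited
  | fuel + 1, u :: q, visited =>
    let st := (neigh_set adj u).foldl
      (fun (s : List Int × List Int) w =>
        if removed.contains w || s.1.contains w then s
        else (s.1 ++ [w], s.2 ++ [w])) (visited, q)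
    bfsLoop adj removed fuel st.2 st.1

def components_after_removal (adj : List (Int × List Int)) (removed : List Int) : Int :=
  let nodes := (adj.map Prod.fst).filter (fun u => !(removed.contains u))
  (nodes.foldl
    (fun (s : List Int × Int) start =>
      if s.1.contains start then s
      else (bfsLoop adj removed ((pvUniv adj).length + 1) [start] (s.1 ++ [start]), s.2 + 1))
    ([], 0)).2

-- ===== PORT B =====
-- keys/idx building loop: `for u in adj: if u not in removed and u not in idx: idx[u] = len(keys); keys.append(u)`
def keysIdx (adj : List (Int × List Int)) (removed : List Int) :
    List Int × PySem.Dict Int Int :=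
  (adj.map Prod.fst).foldl
    (fun (s : List Int × PySem.Dict Int Int) u =>
      if !(removed.contains u) && !(s.2.contains u) then
        (s.1 ++ [u], s.2.insert u (s.1.length : Int))
      else s)
    ([], PySem.Dict.empty)

-- one relaxation attempt: `if w not in removed: j = idx[w]; if label[j] > lu: label[j] = lu; changed = True`;
-- Python raises KeyError when w is missing from idx (excluded by Pre_) — there the port skips w.
def stepB (removed : List Int) (idx : PySem.Dict Int Int) (lu : Int)
    (s2 : List Int × Bool) (w : Int) : List Int × Bool :=
  if !(removed.contains w) then
    match idx.get? w with
    | some j =>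
      if lu < PySem.List.pyGetD s2.1 j 0 then (PySem.List.pySetD s2.1 j lu, true) else s2
    | none => s2
  else s2

-- the inner `for w in adj[keys[i]]:` relaxation loop; lu = label[i] read before the loop;
-- state = (label, changed)
def innerB (removed : List Int) (idx : PySem.Dict Int Int) (lu : Int) (ws : List Int)
    (s : List Int × Bool) : List Int × Bool :=
  ws.foldl (stepB removed idx lu) s

-- one full `for i in range(n):` relaxation pass (adj[keys[i]] cannot KeyError: keys[i] is a key)
def passB (adj : List (Int × List Int)) (removed : List Int) (keys : List Int)
    (idx : PySem.Dict Int Int) (s : List Int × Bool) : List Int × Bool :=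
  (PySem.List.pyRange 0 (keys.length : Int) 1).foldl
    (fun (s : List Int × Bool) i =>
      innerB removed idx (PySem.List.pyGetD s.1 i 0)
        (((PySem.Dict.mk adj).get? (PySem.List.pyGetD keys i 0)).getD []) s)
    s

-- the `while changed:` loop; fuel n*n+1 is a pure totality guard (each changed pass strictly
-- decreases the sum of the labels, which starts below n*n)
def loopB (adj : List (Int × List Int)) (removed : List Int) (keys : List Int)
    (idx : PySem.Dict Int Int) : Nat → List Int → List Int
  | 0, lab => lab
  | fuel + 1, lab =>
    let st := passB adj removed keys idx (lab, false)
    if st.2 then loopB adj removed keys idx fuel st.1 else st.1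

def components_after_removal_alt (adj : List (Int × List Int)) (removed : List Int) : Int :=
  let ki := keysIdx adj removed
  let n := ki.1.length
  let lab := loopB adj removed ki.1 ki.2 (n * n + 1) (PySem.List.pyRange 0 (n : Int) 1)
  (PySem.List.pyRange 0 (n : Int) 1).foldl
    (fun c i => if PySem.List.pyGetD lab i 0 == i then c + 1 else c) 0

-- ===== PRECONDITION & SPEC =====
-- Pre_ excludes exactly the inputs where Python A raises KeyError: a non-removed key has a
-- non-removed neighbour that is not a key of adj (such a neighbour is always visited and then
-- popped, so adj[w] raises).
def Pre_components_after_removal (adj : List (Int × List Int)) (removed : List Int) : Prop :=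
  ∀ p ∈ adj, p.1 ∉ removed → ∀ w ∈ p.2, w ∉ removed → w ∈ adj.map Prod.fst

instance (adj : List (Int × List Int)) (removed : List Int) :
    Decidable (Pre_components_after_removal adj removed) := by
  unfold Pre_components_after_removal; infer_instance

def pvWitness_components_after_removal : (List (Int × List Int)) × List Int :=
  ([(1, [2]), (2, [1, 3]), (3, []), (4, [4])], [3])

def Spec_components_after_removal (adj : List (Int × List Int)) (removed : List Int) (out : Int) : Prop := out = components_after_removal_alt adj removed
instance (adj : List (Int × List Int)) (removed : List Int) (out : Int) : Decidable (Spec_components_after_removal adj removed out) := by unfold Spec_components_after_removal; infer_instance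

-- ===== CLAIM (what is proved, stated in full; the proofs are below) =====
def Claim_equal_components_after_removal : Prop := ∀ (adj : List (Int × List Int)) (removed : List Int), Dom_components_after_removal adj removed → Pre_components_after_removal adj removed → Spec_components_after_removal adj removed (components_after_removal adj removed)

-- ===== LEMMAS AND PROOFS =====

-- successors of u in the graph: the value stored at key u (empty when u is not a key)
def succOf (adj : List (Int × List Int)) (u : Int) : List Int :=
  ((PySem.Dict.mk adj).get? u).getD []

-- one directed edge u → y surviving the removal
def Step (adj : List (Int × List Int)) (removed : List Int) (x y : Int) : Prop :=
  y ∉ removed ∧ y ∈ succOf adj x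

def Reach (adj : List (Int × List Int)) (removed : List Int) : Int → Int → Prop :=
  Relation.ReflTransGen (Step adj removed)

-- ---------- A-side: characterization of the BFS worklist loop ----------

-- worklist loop in the shape the lemmas use (push at the back = A's queue)
def gLoop (removed : List Int) (succ : Int → List Int) :
    Nat → List Int → List Int → List Int
  | 0, _, visited => visited
  | _ + 1, [], visited => visited
  | fuel + 1, u :: q, visited =>
    let st := (succ u).foldl
      (fun (s : List Int × List Int) w =>
        if removed.contains w || s.1.contains w then s
        else (s.1 ++ [w], s.2 ++ [w])) (visited, q)
    gLoop removed succ fuel st.2 st.1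

lemma bfs_eq_g (adj : List (Int × List Int)) (removed : List Int) :
    ∀ fuel q v, bfsLoop adj removed fuel q v
      = gLoop removed (neigh_set adj) fuel q v
  | 0, _, _ => rfl
  | _ + 1, [], _ => rfl
  | fuel + 1, u :: q, v => by
    simp only [bfsLoop, gLoop]
    exact bfs_eq_g adj removed fuel _ _

-- the inner for-loop of one pop, as its own function
def innerF (removed : List Int) (ns : List Int) (v q : List Int) : List Int × List Int :=
  ns.foldl
    (fun (s : List Int × List Int) w =>
      if removed.contains w || s.1.contains w then s
      else (s.1 ++ [w], s.2 ++ [w])) (v, q)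

lemma gLoop_cons (removed : List Int) (succ : Int → List Int)
    (fuel : Nat) (u : Int) (q v : List Int) :
    gLoop removed succ (fuel + 1) (u :: q) v
      = gLoop removed succ fuel (innerF removed (succ u) v q).2
          (innerF removed (succ u) v q).1 := rfl

lemma innerF_cons (removed : List Int) (w : Int) (ns v q : List Int) :
    innerF removed (w :: ns) v q
      = if removed.contains w || v.contains w then innerF removed ns v q
        else innerF removed ns (v ++ [w]) (q ++ [w]) := by
  simp only [innerF, List.foldl_cons]
  split_ifs with h <;> simp

lemma innerF_visited_mem (removed : List Int) :
    ∀ ns v q x, x ∈ (innerF removed ns v q).1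
      ↔ x ∈ v ∨ (x ∈ ns ∧ x ∉ removed) := by
  intro ns
  induction ns with
  | nil => intro v q x; simp [innerF]
  | cons w ns ih =>
    intro v q x
    rw [innerF_cons]
    by_cases hxw : x = w <;> split_ifs with h <;>
      simp only [Bool.or_eq_true, List.contains_iff_mem] at h <;>
      simp [ih, hxw, List.mem_cons] <;> tauto

lemma innerF_work_mem (removed : List Int) :
    ∀ ns v q x, x ∈ (innerF removed ns v q).2
      ↔ x ∈ q ∨ (x ∈ ns ∧ x ∉ removed ∧ x ∉ v) := by
  intro ns
  induction ns with
  | nil => intro v q x; simp [innerF]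
  | cons w ns ih =>
    intro v q x
    rw [innerF_cons]
    by_cases hxw : x = w <;> split_ifs with h <;>
      simp only [Bool.or_eq_true, List.contains_iff_mem] at h <;>
      simp [ih, hxw, List.mem_cons] <;> tauto

lemma innerF_work_nodup (removed : List Int) :
    ∀ ns v q, q.Nodup → (∀ x ∈ q, x ∈ v) →
      (innerF removed ns v q).2.Nodup := by
  intro ns
  induction ns with
  | nil => intro v q hq _; simpa [innerF] using hq
  | cons w ns ih =>
    intro v q hq hqv
    rw [innerF_cons]
    split_ifs with h
    · exact ih v q hq hqv
    · have h' : w ∉ removed ∧ w ∉ v := by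
        simpa [List.contains_iff_mem, not_or] using h
      refine ih (v ++ [w]) (q ++ [w])
        (hq.append (List.nodup_singleton w)
          (fun a ha hb => (List.mem_singleton.mp hb ▸ h'.2) (hqv a ha))) ?_
      · intro x hx
        rcases List.mem_append.mp hx with hxq | hxw
        · exact List.mem_append.mpr (Or.inl (hqv x hxq))
        · simp [List.mem_singleton.mp hxw]

lemma innerF_measure (removed : List Int) (U : List Int) :
    ∀ ns v q, (∀ w ∈ ns, w ∈ U) →
      (U.toFinset \ (innerF removed ns v q).1.toFinset).card
          + (innerF removed ns v q).2.length
        ≤ (U.toFinset \ v.toFinset).card + q.length := by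
  intro ns
  induction ns with
  | nil => intro v q _; simp [innerF]
  | cons w ns ih =>
    intro v q hns
    rw [innerF_cons]
    split_ifs with h
    · exact ih v q (fun x hx => hns x (List.mem_cons_of_mem _ hx))
    · have h' : w ∉ removed ∧ w ∉ v := by
        simpa [List.contains_iff_mem, not_or] using h
      have hwU : w ∈ U := hns w List.mem_cons_self
      have hkey : (U.toFinset \ (v ++ [w]).toFinset) = (U.toFinset \ v.toFinset).erase w := by
        ext z
        simp only [Finset.mem_sdiff, List.mem_toFinset, List.mem_append, List.mem_singleton,
          Finset.mem_erase]
        tauto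
      have hwmem : w ∈ U.toFinset \ v.toFinset := by
        simp only [Finset.mem_sdiff, List.mem_toFinset]; exact ⟨hwU, h'.2⟩
      have hcard : (U.toFinset \ (v ++ [w]).toFinset).card + 1
          = (U.toFinset \ v.toFinset).card := by
        rw [hkey, Finset.card_erase_of_mem hwmem]
        have : 0 < (U.toFinset \ v.toFinset).card := Finset.card_pos.mpr ⟨w, hwmem⟩
        omega
      have := ih (v ++ [w]) (q ++ [w]) (fun x hx => hns x (List.mem_cons_of_mem _ hx))
      simp only [List.length_append, List.length_singleton] at this
      omega

lemma gLoop_mono (removed : List Int) (succ : Int → List Int) :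
    ∀ fuel q v x, x ∈ v → x ∈ gLoop removed succ fuel q v := by
  intro fuel
  induction fuel with
  | zero => intro q v x hx; exact hx
  | succ fuel ih =>
    intro q v x hx
    cases q with
    | nil => exact hx
    | cons u q =>
      rw [gLoop_cons]
      exact ih _ _ x ((innerF_visited_mem removed _ v q x).mpr (Or.inl hx))

-- final visited set is Step-closed, given the invariants and enough fuel
lemma gLoop_closed (adj : List (Int × List Int)) (removed : List Int)
    (succ : Int → List Int)
    (hsucc : ∀ u y, y ∈ succ u ↔ y ∈ succOf adj u)
    (U : List Int) (hU : ∀ u y, y ∈ succ u → y ∈ U) :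
    ∀ fuel q v,
      (∀ x ∈ q, x ∈ v) → q.Nodup →
      (∀ x ∈ v, x ∉ q → ∀ y, Step adj removed x y → y ∈ v) →
      (U.toFinset \ v.toFinset).card + q.length ≤ fuel →
      ∀ x ∈ gLoop removed succ fuel q v, ∀ y, Step adj removed x y →
        y ∈ gLoop removed succ fuel q v := by
  intro fuel
  induction fuel with
  | zero =>
    intro q v ha hn hb hf x hx y hst
    have hq : q = [] := List.eq_nil_of_length_eq_zero (by omega)
    subst hq
    exact hb x hx (by simp) y hst
  | succ fuel ih =>
    intro q v ha hn hb hf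
    cases q with
    | nil => intro x hx y hst; exact hb x hx (by simp) y hst
    | cons u q =>
      rw [gLoop_cons]
      have hvm := innerF_visited_mem removed (succ u) v q
      have hwm := innerF_work_mem removed (succ u) v q
      refine ih _ _ ?_ ?_ ?_ ?_
      · intro x hx
        rcases (hwm x).mp hx with hxq | ⟨hxs, hxr, _⟩
        · exact (hvm x).mpr (Or.inl (ha x (List.mem_cons_of_mem _ hxq)))
        · exact (hvm x).mpr (Or.inr ⟨hxs, hxr⟩)
      · exact innerF_work_nodup removed (succ u) v q hn.of_cons
          (fun x hx => ha x (List.mem_cons_of_mem _ hx))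
      · intro x hxv hxq y hst
        by_cases hxu : x = u
        · subst hxu
          exact (hvm y).mpr (Or.inr ⟨(hsucc x y).mpr hst.2, hst.1⟩)
        · rcases (hvm x).mp hxv with hxv0 | ⟨hxs, hxr⟩
          · have hxnq : x ∉ u :: q := by
              intro hmem
              rcases List.mem_cons.mp hmem with rfl | hmem
              · exact hxu rfl
              · exact hxq ((hwm x).mpr (Or.inl hmem))
            exact (hvm y).mpr (Or.inl (hb x hxv0 hxnq y hst))
          · by_cases hxv0 : x ∈ v
            · have hxnq : x ∉ u :: q := by
                intro hmem
                rcases List.mem_cons.mp hmem with rfl | hmem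
                · exact hxu rfl
                · exact hxq ((hwm x).mpr (Or.inl hmem))
              exact (hvm y).mpr (Or.inl (hb x hxv0 hxnq y hst))
            · exact absurd ((hwm x).mpr (Or.inr ⟨hxs, hxr, hxv0⟩)) hxq
      · have := innerF_measure removed U (succ u) v q (hU u)
        simp only [List.length_cons] at hf
        omega

lemma gLoop_sound (adj : List (Int × List Int)) (removed : List Int)
    (succ : Int → List Int)
    (hsucc : ∀ u y, y ∈ succ u ↔ y ∈ succOf adj u) :
    ∀ fuel q v x, x ∈ gLoop removed succ fuel q v →
      x ∈ v ∨ ∃ s ∈ q, Reach adj removed s x := by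
  intro fuel
  induction fuel with
  | zero => intro q v x hx; exact Or.inl hx
  | succ fuel ih =>
    intro q v x hx
    cases q with
    | nil => exact Or.inl hx
    | cons u q =>
      rw [gLoop_cons] at hx
      rcases ih _ _ x hx with hxv | ⟨s, hs, hr⟩
      · rcases (innerF_visited_mem removed (succ u) v q x).mp hxv with hxv0 | ⟨hxs, hxr⟩
        · exact Or.inl hxv0
        · exact Or.inr ⟨u, List.mem_cons_self,
            Relation.ReflTransGen.single ⟨hxr, (hsucc u x).mp hxs⟩⟩
      · rcases (innerF_work_mem removed (succ u) v q s).mp hs with hsq | ⟨hss, hsr, _⟩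
        · exact Or.inr ⟨s, List.mem_cons_of_mem _ hsq, hr⟩
        · exact Or.inr ⟨u, List.mem_cons_self,
            Relation.ReflTransGen.head ⟨hsr, (hsucc u s).mp hss⟩ hr⟩

lemma gLoop_char (adj : List (Int × List Int)) (removed : List Int)
    (succ : Int → List Int)
    (hsucc : ∀ u y, y ∈ succ u ↔ y ∈ succOf adj u)
    (U : List Int) (hU : ∀ u y, y ∈ succ u → y ∈ U)
    (fuel : Nat) (q v : List Int)
    (ha : ∀ x ∈ q, x ∈ v) (hn : q.Nodup)
    (hb : ∀ x ∈ v, x ∉ q → ∀ y, Step adj removed x y → y ∈ v)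
    (hf : (U.toFinset \ v.toFinset).card + q.length ≤ fuel) :
    ∀ x, x ∈ gLoop removed succ fuel q v
      ↔ x ∈ v ∨ ∃ s ∈ q, Reach adj removed s x := by
  intro x
  constructor
  · exact gLoop_sound adj removed succ hsucc fuel q v x
  · rintro (hxv | ⟨s, hs, hr⟩)
    · exact gLoop_mono removed succ fuel q v x hxv
    · induction hr with
      | refl => exact gLoop_mono removed succ fuel q v s (ha s hs)
      | tail _ hst ih =>
        exact gLoop_closed adj removed succ hsucc U hU
          fuel q v ha hn hb hf _ ih _ hst

lemma succOf_mem_univ (adj : List (Int × List Int)) (u y : Int)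
    (hy : y ∈ succOf adj u) : y ∈ pvUniv adj := by
  unfold succOf at hy
  unfold pvUniv
  rw [PySem.Set.mem_ofList]
  cases hg : (PySem.Dict.mk adj).get? u with
  | none => rw [hg] at hy; simp at hy
  | some ns =>
    rw [hg] at hy
    simp only [Option.getD_some] at hy
    have hmem : (u, ns) ∈ adj :=
      PySem.Dict.mem_items_of_get?_eq_some (d := PySem.Dict.mk adj) hg
    exact List.mem_append.mpr (Or.inr
      (List.mem_flatten.mpr ⟨ns, List.mem_map.mpr ⟨(u, ns), hmem, rfl⟩, hy⟩))

lemma neigh_set_mem (adj : List (Int × List Int)) (u y : Int) :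
    y ∈ neigh_set adj u ↔ y ∈ succOf adj u := by
  simp [neigh_set, succOf, PySem.Set.mem_ofList]

lemma fuel_start (adj : List (Int × List Int)) (v : List Int) (k : Int) :
    ((pvUniv adj).toFinset \ (v ++ [k]).toFinset).card + 1 ≤ (pvUniv adj).length + 1 := by
  have h1 : ((pvUniv adj).toFinset \ (v ++ [k]).toFinset).card ≤ (pvUniv adj).toFinset.card :=
    Finset.card_le_card (Finset.sdiff_subset)
  have h2 := (pvUniv adj).toFinset_card_le
  omega

-- characterization of one run of A's BFS started at a fresh k, given the visited set is Step-closed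
lemma bfs_run_char (adj : List (Int × List Int)) (removed : List Int) (v : List Int) (k : Int)
    (hb : ∀ x ∈ v, ∀ y, Step adj removed x y → y ∈ v) :
    ∀ x, x ∈ bfsLoop adj removed ((pvUniv adj).length + 1) [k] (v ++ [k])
      ↔ (x ∈ v ∨ x = k) ∨ Reach adj removed k x := by
  intro x
  have hbrun : ∀ x ∈ v ++ [k], x ∉ ([k] : List Int) → ∀ y, Step adj removed x y →
      y ∈ v ++ [k] := by
    intro x hxv hxk y hst
    rcases List.mem_append.mp hxv with hxv | hxk'
    · exact List.mem_append.mpr (Or.inl (hb x hxv y hst))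
    · exact absurd hxk' hxk
  rw [bfs_eq_g, gLoop_char adj removed (neigh_set adj)
    (neigh_set_mem adj) (pvUniv adj)
    (fun u y hy => succOf_mem_univ adj u y ((neigh_set_mem adj u y).mp hy))
    _ _ _ (by intro z hz; simp at hz; simp [hz]) (by simp) hbrun (fuel_start adj v k)]
  try simp only [List.mem_singleton, List.mem_append, exists_eq_left]
  try tauto

-- one run keeps the visited set Step-closed
lemma bfs_run_closed (adj : List (Int × List Int)) (removed : List Int) (v : List Int) (k : Int)
    (hb : ∀ x ∈ v, ∀ y, Step adj removed x y → y ∈ v) :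
    ∀ x ∈ bfsLoop adj removed ((pvUniv adj).length + 1) [k] (v ++ [k]),
      ∀ y, Step adj removed x y →
        y ∈ bfsLoop adj removed ((pvUniv adj).length + 1) [k] (v ++ [k]) := by
  intro x hx y hst
  rw [bfs_run_char adj removed v k hb] at hx ⊢
  rcases hx with (hxv | rfl) | hr
  · exact Or.inl (Or.inl (hb x hxv y hst))
  · exact Or.inr (Relation.ReflTransGen.single hst)
  · exact Or.inr (hr.tail hst)

-- ---------- A-side: the outer fold ----------

def stepA (adj : List (Int × List Int)) (removed : List Int)
    (s : List Int × Int) (start : Int) : List Int × Int :=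
  if s.1.contains start then s
  else (bfsLoop adj removed ((pvUniv adj).length + 1) [start] (s.1 ++ [start]), s.2 + 1)

def foldA (adj : List (Int × List Int)) (removed : List Int)
    (l : List Int) (s : List Int × Int) : List Int × Int :=
  l.foldl (stepA adj removed) s

lemma foldA_cons (adj : List (Int × List Int)) (removed : List Int)
    (x : Int) (l : List Int) (s : List Int × Int) :
    foldA adj removed (x :: l) s = foldA adj removed l (stepA adj removed s x) := rfl

lemma stepA_mem (adj : List (Int × List Int)) (removed : List Int)
    {s : List Int × Int} {x : Int} (h : x ∈ s.1) : stepA adj removed s x = s := by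
  unfold stepA; rw [if_pos (List.contains_iff_mem.mpr h)]

lemma stepA_not_mem (adj : List (Int × List Int)) (removed : List Int)
    {s : List Int × Int} {x : Int} (h : x ∉ s.1) :
    stepA adj removed s x
      = (bfsLoop adj removed ((pvUniv adj).length + 1) [x] (s.1 ++ [x]), s.2 + 1) := by
  unfold stepA; rw [if_neg (by simpa [List.contains_iff_mem] using h)]

lemma portA_eq (adj : List (Int × List Int)) (removed : List Int) :
    components_after_removal adj removed
      = (foldA adj removed ((adj.map Prod.fst).filter (fun u => !(removed.contains u))) ([], 0)).2 := rfl

-- the surviving keys, in first-occurrence order, as a pure recursion (seen-accumulator form)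
def fresh (removed : List Int) : List Int → List Int → List Int
  | [], _ => []
  | u :: t, seen =>
    if !(removed.contains u) && !(seen.contains u) then u :: fresh removed t (seen ++ [u])
    else fresh removed t seen

-- the keysIdx fold computes `seen ++ fresh l seen`, and idx always looks up the index in keys
lemma keysIdx_char (removed : List Int) :
    ∀ (l : List Int) (ks : List Int) (d : PySem.Dict Int Int),
      (∀ w, d.get? w = (PySem.List.index? ks w).map Int.ofNat) →
      (l.foldl
        (fun (s : List Int × PySem.Dict Int Int) u =>
          if !(removed.contains u) && !(s.2.contains u) then
            (s.1 ++ [u], s.2.insert u (s.1.length : Int))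
          else s)
        (ks, d)).1 = ks ++ fresh removed l ks
      ∧ ∀ w, (l.foldl
        (fun (s : List Int × PySem.Dict Int Int) u =>
          if !(removed.contains u) && !(s.2.contains u) then
            (s.1 ++ [u], s.2.insert u (s.1.length : Int))
          else s)
        (ks, d)).2.get? w
          = (PySem.List.index? (ks ++ fresh removed l ks) w).map Int.ofNat := by
  intro l
  induction l with
  | nil => intro ks d hd; simp [fresh]; exact hd
  | cons u t ih =>
    intro ks d hd
    have hmem : d.contains u = (PySem.List.index? ks u).isSome := by
      rw [PySem.Dict.contains_eq_isSome_get?, hd u]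
      cases PySem.List.index? ks u <;> rfl
    by_cases hu : u ∉ removed ∧ u ∉ ks
    · have hci : PySem.List.index? ks u = none := by
        rw [PySem.List.index?_eq_none_iff]; exact hu.2
      have hcond : (!(removed.contains u) && !(d.contains u)) = true := by
        simp [hmem, hu.1, hu.2]
      have hfr : fresh removed (u :: t) ks = u :: fresh removed t (ks ++ [u]) := by
        have : (!(removed.contains u) && !(ks.contains u)) = true := by
          simp [hu.1, hu.2]
        rw [fresh, if_pos this]
      have hd' : ∀ w, (d.insert u (ks.length : Int)).get? w
          = (PySem.List.index? (ks ++ [u]) w).map Int.ofNat := by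
        intro w
        rw [PySem.Dict.get?_insert]
        rcases eq_or_ne w u with rfl | hne
        · rw [if_pos rfl, PySem.List.index?_append_singleton_self _ _ hu.2]; rfl
        · rw [if_neg hne, hd w]
          by_cases hwk : w ∈ ks
          · rw [PySem.List.index?_append_of_mem _ hwk]
          · rw [(PySem.List.index?_eq_none_iff _ _).mpr hwk,
              (PySem.List.index?_eq_none_iff _ _).mpr (by simp [hwk, hne])]
      obtain ⟨ih1, ih2⟩ := ih (ks ++ [u]) (d.insert u (ks.length : Int)) hd'
      have hstep : (if (!(removed.contains u) && !((ks, d).2.contains u)) = true then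
            ((ks, d).1 ++ [u], (ks, d).2.insert u (((ks, d).1.length : Nat) : Int))
          else (ks, d)) = (ks ++ [u], d.insert u (ks.length : Int)) := by
        rw [if_pos hcond]
      rw [List.foldl_cons, hstep, hfr]
      refine ⟨?_, ?_⟩
      · rw [ih1]; simp
      · intro w; rw [ih2 w]; simp
    · have hcond : (!(removed.contains u) && !(d.contains u)) = false := by
        rcases not_and_or.mp hu with h | h
        · simp [not_not.mp h]
        · have : (PySem.List.index? ks u).isSome := by
            rw [PySem.List.index?_isSome_iff]; exact not_not.mp h
          simp [hmem]
          exact fun _ => not_not.mp h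
      have hfr : fresh removed (u :: t) ks = fresh removed t ks := by
        rw [fresh]
        have h1 : ¬ ((!(removed.contains u) && !(ks.contains u)) = true) := by
          rcases not_and_or.mp hu with h | h <;>
            simp [not_not.mp h]
        rw [if_neg h1]
      have hstep : (if (!(removed.contains u) && !((ks, d).2.contains u)) = true then
            ((ks, d).1 ++ [u], (ks, d).2.insert u (((ks, d).1.length : Nat) : Int))
          else (ks, d)) = (ks, d) := by
        rw [if_neg (by rw [hcond]; simp)]
      rw [List.foldl_cons, hstep, hfr]
      exact ih ks d hd


-- fresh produces, appended to seen, a duplicate-free list; its members are the non-removed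
-- entries of l not already seen
lemma fresh_char (removed : List Int) :
    ∀ (l seen : List Int), seen.Nodup →
      (seen ++ fresh removed l seen).Nodup
      ∧ ∀ x, (x ∈ fresh removed l seen ↔ x ∈ l ∧ x ∉ removed ∧ x ∉ seen) := by
  intro l
  induction l with
  | nil => intro seen hs; simp [fresh, hs]
  | cons u t ih =>
    intro seen hs
    by_cases hu : u ∉ removed ∧ u ∉ seen
    · have hfr : fresh removed (u :: t) seen = u :: fresh removed t (seen ++ [u]) := by
        have hcond : (!(removed.contains u) && !(seen.contains u)) = true := by
          simp [hu.1, hu.2]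
        rw [fresh, if_pos hcond]
      have hs' : (seen ++ [u]).Nodup := by
        refine hs.append (List.nodup_singleton u) ?_
        intro a ha hb
        rw [List.mem_singleton] at hb
        subst hb; exact hu.2 ha
      obtain ⟨ihn, ihm⟩ := ih (seen ++ [u]) hs'
      rw [hfr]
      constructor
      · simpa [List.append_assoc] using ihn
      · intro x
        simp only [List.mem_cons, ihm]
        constructor
        · rintro (rfl | ⟨hxt, hxr, hxs⟩)
          · exact ⟨Or.inl rfl, hu.1, hu.2⟩
          · simp only [List.mem_append, List.mem_singleton, not_or] at hxs
            exact ⟨Or.inr hxt, hxr, hxs.1⟩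
        · rintro ⟨hxl, hxr, hxs⟩
          rcases hxl with rfl | hxt
          · exact Or.inl rfl
          · by_cases hxu : x = u
            · exact Or.inl hxu
            · exact Or.inr ⟨hxt, hxr, by simp [List.mem_append, hxs, hxu]⟩
    · have hfr : fresh removed (u :: t) seen = fresh removed t seen := by
        have hcond : (!(removed.contains u) && !(seen.contains u)) = false := by
          rcases not_and_or.mp hu with h | h <;> simp [not_not.mp h]
        rw [fresh]; simp
        exact fun h1 h2 => absurd ⟨h1, h2⟩ hu
      obtain ⟨ihn, ihm⟩ := ih seen hs
      rw [hfr]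
      refine ⟨ihn, ?_⟩
      intro x
      rw [ihm]
      constructor
      · rintro ⟨hxt, hxr, hxs⟩; exact ⟨List.mem_cons_of_mem _ hxt, hxr, hxs⟩

      · rintro ⟨hxl, hxr, hxs⟩
        rcases List.mem_cons.mp hxl with rfl | hxt
        · rcases not_and_or.mp hu with h | h
          · exact absurd hxr (by simpa using h)
          · exact absurd hxs (by simpa using h)
        · exact ⟨hxt, hxr, hxs⟩


-- A's outer fold over the (possibly duplicated) filtered key list equals the fold over the
-- deduplicated key list: a duplicate start is already visited and skipped
lemma foldA_dedup (adj : List (Int × List Int)) (removed : List Int) :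
    ∀ (l : List Int) (seen : List Int) (v : List Int) (c : Int),
      (∀ x ∈ seen, x ∈ v) →
      (foldA adj removed (l.filter (fun u => !(removed.contains u))) (v, c)).2
        = (foldA adj removed (fresh removed l seen) (v, c)).2 := by
  intro l
  induction l with
  | nil => intro seen v c _; rfl
  | cons u t ih =>
    intro seen v c hsv
    by_cases hur : u ∈ removed
    · have hf : (u :: t).filter (fun u => !(removed.contains u))
          = t.filter (fun u => !(removed.contains u)) := by
        simp [hur]
      have hfr : fresh removed (u :: t) seen = fresh removed t seen := by
        rw [fresh, if_neg (by simp [hur])]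
      rw [hf, hfr]; exact ih seen v c hsv
    · have hf : (u :: t).filter (fun u => !(removed.contains u))
          = u :: t.filter (fun u => !(removed.contains u)) := by
        simp [hur]
      rw [hf]
      by_cases hus : u ∈ seen
      · have hfr : fresh removed (u :: t) seen = fresh removed t seen := by
          rw [fresh, if_neg (by simp [hus])]
        rw [hfr, foldA_cons, stepA_mem adj removed (hsv u hus)]
        exact ih seen v c hsv
      · have hfr : fresh removed (u :: t) seen
            = u :: fresh removed t (seen ++ [u]) := by
          rw [fresh, if_pos (by simp [hur, hus])]
        rw [hfr, foldA_cons, foldA_cons]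
        by_cases huv : u ∈ v
        · rw [stepA_mem adj removed huv]
          exact ih (seen ++ [u]) v c (by
            intro x hx
            rcases List.mem_append.mp hx with hx | hx
            · exact hsv x hx
            · rw [List.mem_singleton.mp hx]; exact huv)
        · rw [stepA_not_mem adj removed huv]
          refine ih (seen ++ [u]) _ _ ?_
          intro x hx
          have hxv : x ∈ v ++ [u] := by
            rcases List.mem_append.mp hx with hx | hx
            · exact List.mem_append.mpr (Or.inl (hsv x hx))
            · exact List.mem_append.mpr (Or.inr hx)
          rw [bfs_eq_g]
          exact gLoop_mono removed (neigh_set adj) _ _ _ x hxv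


-- the count of A's outer fold, as a recursion over the remaining starts
noncomputable def countA (adj : List (Int × List Int)) (removed : List Int) :
    List Int → List Int → Int
  | _, [] => 0
  | done, x :: t =>
    (@ite Int (∃ s ∈ done, Reach adj removed s x) (Classical.propDecidable _) 0 1)
      + countA adj removed (done ++ [x]) t

lemma countA_cons (adj : List (Int × List Int)) (removed : List Int)
    (done : List Int) (x : Int) (t : List Int) :
    countA adj removed done (x :: t)
      = (@ite Int (∃ s ∈ done, Reach adj removed s x) (Classical.propDecidable _) 0 1)
        + countA adj removed (done ++ [x]) t := rfl

lemma foldA_count (adj : List (Int × List Int)) (removed : List Int) :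
    ∀ (rest done : List Int) (v : List Int) (c : Int),
      (∀ x, x ∈ v ↔ ∃ s ∈ done, Reach adj removed s x) →
      (∀ x ∈ v, ∀ y, Step adj removed x y → y ∈ v) →
      (foldA adj removed rest (v, c)).2 = c + countA adj removed done rest := by
  intro rest
  induction rest with
  | nil => intro done v c _ _; simp [foldA, countA]
  | cons x t ih =>
    intro done v c hv hb
    rw [foldA_cons, countA_cons]
    by_cases hx : ∃ s ∈ done, Reach adj removed s x
    · rw [if_pos hx, stepA_mem adj removed ((hv x).mpr hx)]
      have hv' : ∀ y, y ∈ v ↔ ∃ s ∈ done ++ [x], Reach adj removed s y := by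
        intro y
        rw [hv y]
        constructor
        · rintro ⟨s, hs, hr⟩; exact ⟨s, List.mem_append.mpr (Or.inl hs), hr⟩
        · rintro ⟨s, hs, hr⟩
          rcases List.mem_append.mp hs with hs | hs
          · exact ⟨s, hs, hr⟩
          · obtain ⟨s0, hs0, hr0⟩ := hx
            rw [List.mem_singleton.mp hs] at hr
            exact ⟨s0, hs0, hr0.trans hr⟩
      rw [ih (done ++ [x]) v c hv' hb]
      ring
    · have hxv : x ∉ v := fun h => hx ((hv x).mp h)
      rw [if_neg hx, stepA_not_mem adj removed hxv]
      have hbv : ∀ z ∈ v, ∀ y, Step adj removed z y → y ∈ v := hb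
      have hv' : ∀ y,
          y ∈ bfsLoop adj removed ((pvUniv adj).length + 1) [x] (v ++ [x])
            ↔ ∃ s ∈ done ++ [x], Reach adj removed s y := by
        intro y
        rw [bfs_run_char adj removed v x hbv]
        constructor
        · rintro ((hyv | rfl) | hr)
          · obtain ⟨s, hs, hr⟩ := (hv y).mp hyv
            exact ⟨s, List.mem_append.mpr (Or.inl hs), hr⟩
          · exact ⟨y, List.mem_append.mpr (Or.inr (by simp)), Relation.ReflTransGen.refl⟩
          · exact ⟨x, List.mem_append.mpr (Or.inr (by simp)), hr⟩
        · rintro ⟨s, hs, hr⟩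
          rcases List.mem_append.mp hs with hs | hs
          · exact Or.inl (Or.inl ((hv y).mpr ⟨s, hs, hr⟩))
          · rw [List.mem_singleton.mp hs] at hr
            exact Or.inr hr
      rw [ih (done ++ [x]) _ (c + 1) hv' (bfs_run_closed adj removed v x hbv)]
      ring


-- ---------- index-level reachability ----------

def EdgeK (adj : List (Int × List Int)) (keys : List Int) (i j : Nat) : Prop :=
  i < keys.length ∧ j < keys.length ∧ keys.getD j 0 ∈ succOf adj (keys.getD i 0)

def ReachK (adj : List (Int × List Int)) (keys : List Int) : Nat → Nat → Prop :=
  Relation.ReflTransGen (EdgeK adj keys)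

-- a node with a successor is a key of adj
lemma key_of_succ (adj : List (Int × List Int)) (b y : Int)
    (hy : y ∈ succOf adj b) : b ∈ adj.map Prod.fst := by
  unfold succOf at hy
  cases hg : (PySem.Dict.mk adj).get? b with
  | none => rw [hg] at hy; simp at hy
  | some ns =>
    have hmem : (b, ns) ∈ adj :=
      PySem.Dict.mem_items_of_get?_eq_some (d := PySem.Dict.mk adj) hg
    exact List.mem_map.mpr ⟨(b, ns), hmem, rfl⟩

lemma edgeK_step (adj : List (Int × List Int)) (removed keys : List Int)
    (hkr : ∀ x ∈ keys, x ∉ removed) {i j : Nat} (h : EdgeK adj keys i j) :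
    Step adj removed (keys.getD i 0) (keys.getD j 0) := by
  obtain ⟨hi, hj, hs⟩ := h
  exact ⟨hkr _ (by rw [List.getD_eq_getElem _ _ hj]; exact List.getElem_mem hj), hs⟩

lemma reachK_reach (adj : List (Int × List Int)) (removed keys : List Int)
    (hkr : ∀ x ∈ keys, x ∉ removed) {i j : Nat} (h : ReachK adj keys i j) :
    Reach adj removed (keys.getD i 0) (keys.getD j 0) := by
  induction h with
  | refl => exact Relation.ReflTransGen.refl
  | tail _ he ih => exact ih.tail (edgeK_step adj removed keys hkr he)

lemma reach_reachK (adj : List (Int × List Int)) (removed keys : List Int)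
    (hkeys : ∀ x, x ∈ keys ↔ x ∈ adj.map Prod.fst ∧ x ∉ removed) :
    ∀ x u, Reach adj removed x u → x ∈ keys → u ∈ keys →
      ReachK adj keys (keys.idxOf x) (keys.idxOf u) := by
  intro x u h hx hu
  revert hx
  refine Relation.ReflTransGen.head_induction_on h ?_ ?_
  · intro _; exact Relation.ReflTransGen.refl
  · intro a c hac hcb ih hak
    have hck : c ∈ keys := by
      rcases Relation.ReflTransGen.cases_head_iff.mp hcb with rfl | ⟨d, hcd, _⟩
      · exact hu
      · exact (hkeys c).mpr ⟨key_of_succ adj c d hcd.2, hac.1⟩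
    have hia := List.idxOf_lt_length_of_mem hak
    have hic := List.idxOf_lt_length_of_mem hck
    have ha' : keys.getD (keys.idxOf a) 0 = a := by
      rw [List.getD_eq_getElem _ _ hia]; exact List.getElem_idxOf hia
    have hc' : keys.getD (keys.idxOf c) 0 = c := by
      rw [List.getD_eq_getElem _ _ hic]; exact List.getElem_idxOf hic
    exact Relation.ReflTransGen.head
      ⟨hia, hic, by rw [ha', hc']; exact hac.2⟩ (ih hck)


-- ---------- B-side: the relaxation fixpoint ----------

def InvL (adj : List (Int × List Int)) (keys lab : List Int) : Prop :=
  lab.length = keys.length ∧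
  ∀ j < keys.length, ∃ i : Nat, ReachK adj keys i j ∧ lab.getD j 0 = (i : Int) ∧ i ≤ j

def pot (keys lab : List Int) : Nat :=
  ∑ i ∈ Finset.range keys.length, (lab.getD i 0).toNat

def StableL (adj : List (Int × List Int)) (keys lab : List Int) : Prop :=
  ∀ i < keys.length, ∀ w ∈ succOf adj (keys.getD i 0), ∀ jn : Nat,
    PySem.List.index? keys w = some jn → lab.getD jn 0 ≤ lab.getD i 0

lemma getD_set_ite (l : List Int) (i j : Nat) (v : Int) (h : i < l.length) :
    (l.set i v).getD j 0 = if j = i then v else l.getD j 0 := by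
  rcases eq_or_ne j i with rfl | hne
  · simp [List.getD_eq_getElem?_getD, List.getElem?_set_self h]
  · simp [List.getD_eq_getElem?_getD, List.getElem?_set_ne (Ne.symm hne), hne]

lemma innerB_cons (removed : List Int) (idx : PySem.Dict Int Int) (lu : Int) (w : Int)
    (ws : List Int) (s : List Int × Bool) :
    innerB removed idx lu (w :: ws) s
      = innerB removed idx lu ws (stepB removed idx lu s w) := rfl

lemma innerB_master (adj : List (Int × List Int)) (removed keys : List Int)
    (idx : PySem.Dict Int Int)
    (Hidx : ∀ w, idx.get? w = (PySem.List.index? keys w).map Int.ofNat)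
    (hkr : ∀ x ∈ keys, x ∉ removed)
    (i i0 : Nat) (hi : i < keys.length) (hreach : ReachK adj keys i0 i) (lu : Int)
    (hlu : lu = (i0 : Int)) :
    ∀ (ws : List Int) (s : List Int × Bool),
      (∀ w ∈ ws, w ∈ succOf adj (keys.getD i 0)) →
      InvL adj keys s.1 →
      InvL adj keys (innerB removed idx lu ws s).1
      ∧ pot keys (innerB removed idx lu ws s).1 ≤ pot keys s.1
      ∧ ((innerB removed idx lu ws s).2 = false → innerB removed idx lu ws s = s
          ∧ ∀ w ∈ ws, ∀ jn : Nat, PySem.List.index? keys w = some jn →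
              s.1.getD jn 0 ≤ lu)
      ∧ (((innerB removed idx lu ws s).2 = true ∧ s.2 = false) →
          pot keys (innerB removed idx lu ws s).1 < pot keys s.1) := by
  intro ws
  induction ws with
  | nil =>
    intro s _ hInv
    refine ⟨hInv, le_refl _, ?_, ?_⟩
    · intro _; exact ⟨rfl, fun w hw => absurd hw (List.not_mem_nil)⟩
    · rintro ⟨h1, h2⟩; rw [show innerB removed idx lu [] s = s from rfl] at h1
      rw [h1] at h2; cases h2
  | cons w ws ih =>
    intro s hsub hInv
    have hsub' : ∀ w' ∈ ws, w' ∈ succOf adj (keys.getD i 0) :=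
      fun w' h => hsub w' (List.mem_cons_of_mem _ h)
    have hw : w ∈ succOf adj (keys.getD i 0) := hsub w List.mem_cons_self
    rw [innerB_cons]
    -- a skipped w never carries an index into keys: used below for the two skip cases
    have hskip3 : ∀ hstep : stepB removed idx lu s w = s,
        (∀ jn : Nat, PySem.List.index? keys w = some jn → s.1.getD jn 0 ≤ lu) ∨
          removed.contains w = true →
        InvL adj keys (innerB removed idx lu ws s).1
        ∧ pot keys (innerB removed idx lu ws s).1 ≤ pot keys s.1
        ∧ ((innerB removed idx lu ws s).2 = false → innerB removed idx lu ws s = s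
            ∧ ∀ w' ∈ w :: ws, ∀ jn : Nat, PySem.List.index? keys w' = some jn →
                s.1.getD jn 0 ≤ lu)
        ∧ (((innerB removed idx lu ws s).2 = true ∧ s.2 = false) →
            pot keys (innerB removed idx lu ws s).1 < pot keys s.1) := by
      intro hstep hw'
      obtain ⟨c1, c2, c3, c4⟩ := ih s hsub' hInv
      refine ⟨c1, c2, ?_, c4⟩
      intro hf
      refine ⟨(c3 hf).1, ?_⟩
      intro w' hw'' jn hjn
      rcases List.mem_cons.mp hw'' with rfl | hw'''
      · rcases hw' with h | h
        · exact h jn hjn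
        · obtain ⟨hjlt, hjget, -⟩ := PySem.List.getElem_of_index?_eq_some hjn
          have : w' ∈ keys := hjget ▸ List.getElem_mem hjlt
          exact absurd (List.contains_iff_mem.mp h) (hkr w' this)
      · exact (c3 hf).2 w' hw''' jn hjn
    cases hrw : removed.contains w with
    | true =>
      have hstep : stepB removed idx lu s w = s := by
        unfold stepB; rw [hrw]; rfl
      rw [hstep]
      exact hskip3 hstep (Or.inr hrw)
    | false =>
      cases hci : PySem.List.index? keys w with
      | none =>
        have hstep : stepB removed idx lu s w = s := by
          unfold stepB; rw [hrw, Hidx w, hci]; rfl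
        rw [hstep]
        refine hskip3 hstep (Or.inl ?_)
        intro jn hjn; rw [hjn] at hci; cases hci
      | some jn =>
        have hHj : idx.get? w = some ((jn : Nat) : Int) := by
          rw [Hidx w, hci]; rfl
        obtain ⟨hjlt, hjget, -⟩ := PySem.List.getElem_of_index?_eq_some hci
        have hlen : s.1.length = keys.length := hInv.1
        by_cases hcond : lu < s.1.getD jn 0
        · -- relaxation fires: label[jn] := lu
          have hstep : stepB removed idx lu s w = (s.1.set jn lu, true) := by
            unfold stepB
            rw [hrw, hHj]
            show (if lu < PySem.List.pyGetD s.1 ((jn : Nat) : Int) 0 then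
                (PySem.List.pySetD s.1 ((jn : Nat) : Int) lu, true) else s) = _
            rw [PySem.List.pyGetD_natCast, PySem.List.pySetD_natCast, if_pos hcond]
          rw [hstep]
          obtain ⟨i1, hri1, hvi1, hle1⟩ := hInv.2 jn hjlt
          have hEdge : EdgeK adj keys i jn :=
            ⟨hi, hjlt, by rw [List.getD_eq_getElem _ _ hjlt, hjget]; exact hw⟩
          have hii : i0 < i1 := by
            rw [hvi1, hlu] at hcond; exact_mod_cast hcond
          have hInv' : InvL adj keys (s.1.set jn lu) := by
            refine ⟨by rw [List.length_set]; exact hlen, ?_⟩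
            intro j hj
            rcases eq_or_ne j jn with rfl | hne
            · refine ⟨i0, hreach.tail hEdge, ?_, by omega⟩
              rw [getD_set_ite _ _ _ _ (hlen ▸ hjlt), if_pos rfl, hlu]
            · obtain ⟨i2, h2, hv2, hle2⟩ := hInv.2 j hj
              refine ⟨i2, h2, ?_, hle2⟩
              rw [getD_set_ite _ _ _ _ (hlen ▸ hjlt), if_neg hne]; exact hv2
          have hpot : pot keys (s.1.set jn lu) < pot keys s.1 := by
            unfold pot
            apply Finset.sum_lt_sum
            · intro k _
              rw [getD_set_ite _ _ _ _ (hlen ▸ hjlt)]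
              split_ifs with hkj
              · subst hkj; rw [hvi1, hlu]; omega
              · exact le_refl _
            · refine ⟨jn, Finset.mem_range.mpr hjlt, ?_⟩
              rw [getD_set_ite _ _ _ _ (hlen ▸ hjlt), if_pos rfl, hvi1, hlu]
              omega
          obtain ⟨c1, c2, c3, c4⟩ := ih (s.1.set jn lu, true) hsub' hInv'
          refine ⟨c1, le_trans c2 (le_of_lt hpot), ?_, ?_⟩
          · intro hf
            have h1 := (c3 hf).1
            rw [h1] at hf
            cases hf
          · intro _
            exact lt_of_le_of_lt c2 hpot
        · -- no change
          have hstep : stepB removed idx lu s w = s := by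
            unfold stepB
            rw [hrw, hHj]
            show (if lu < PySem.List.pyGetD s.1 ((jn : Nat) : Int) 0 then
                (PySem.List.pySetD s.1 ((jn : Nat) : Int) lu, true) else s) = _
            rw [PySem.List.pyGetD_natCast, if_neg hcond]
          rw [hstep]
          refine hskip3 hstep (Or.inl ?_)
          intro jn' hjn'
          rw [hjn'] at hci
          injection hci with h
          subst h
          exact not_lt.mp hcond
lemma passB_eq (adj : List (Int × List Int)) (removed keys : List Int)
    (idx : PySem.Dict Int Int) (s : List Int × Bool) :
    passB adj removed keys idx s
      = (List.range keys.length).foldl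
          (fun (s : List Int × Bool) i =>
            innerB removed idx (s.1.getD i 0) (succOf adj (keys.getD i 0)) s) s := by
  unfold passB
  rw [PySem.List.pyRange_one, List.foldl_map]
  have h1 : ((keys.length : Int) - 0).toNat = keys.length := by omega
  rw [h1]
  apply PySem.List.foldl_congr_mem
  intro acc k hk
  rw [zero_add, PySem.List.pyGetD_natCast, PySem.List.pyGetD_natCast]
  rfl

lemma passR_master (adj : List (Int × List Int)) (removed keys : List Int)
    (idx : PySem.Dict Int Int)
    (Hidx : ∀ w, idx.get? w = (PySem.List.index? keys w).map Int.ofNat)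
    (hkr : ∀ x ∈ keys, x ∉ removed) :
    ∀ (is : List Nat) (s : List Int × Bool),
      (∀ i ∈ is, i < keys.length) →
      InvL adj keys s.1 →
      InvL adj keys ((is.foldl
        (fun (s : List Int × Bool) i =>
          innerB removed idx (s.1.getD i 0) (succOf adj (keys.getD i 0)) s) s)).1
      ∧ pot keys ((is.foldl
        (fun (s : List Int × Bool) i =>
          innerB removed idx (s.1.getD i 0) (succOf adj (keys.getD i 0)) s) s)).1 ≤ pot keys s.1
      ∧ (((is.foldl
        (fun (s : List Int × Bool) i =>
          innerB removed idx (s.1.getD i 0) (succOf adj (keys.getD i 0)) s) s)).2 = false →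
          (is.foldl
            (fun (s : List Int × Bool) i =>
              innerB removed idx (s.1.getD i 0) (succOf adj (keys.getD i 0)) s) s) = s
          ∧ ∀ i ∈ is, ∀ w ∈ succOf adj (keys.getD i 0), ∀ jn : Nat,
              PySem.List.index? keys w = some jn → s.1.getD jn 0 ≤ s.1.getD i 0)
      ∧ ((((is.foldl
        (fun (s : List Int × Bool) i =>
          innerB removed idx (s.1.getD i 0) (succOf adj (keys.getD i 0)) s) s)).2 = true
            ∧ s.2 = false) →
          pot keys ((is.foldl
            (fun (s : List Int × Bool) i =>
              innerB removed idx (s.1.getD i 0) (succOf adj (keys.getD i 0)) s) s)).1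
            < pot keys s.1) := by
  intro is
  induction is with
  | nil =>
    intro s _ hInv
    refine ⟨hInv, le_refl _, ?_, ?_⟩
    · intro _; exact ⟨rfl, fun i hi => absurd hi (List.not_mem_nil)⟩
    · rintro ⟨h1, h2⟩; rw [List.foldl_nil] at h1; rw [h1] at h2; cases h2
  | cons i is ih =>
    intro s his hInv
    have hi : i < keys.length := his i List.mem_cons_self
    have his' : ∀ i' ∈ is, i' < keys.length :=
      fun i' h => his i' (List.mem_cons_of_mem _ h)
    obtain ⟨i0, hr0, hv0, -⟩ := hInv.2 i hi
    obtain ⟨d1, d2, d3, d4⟩ :=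
      innerB_master adj removed keys idx Hidx hkr i i0 hi hr0 (s.1.getD i 0) hv0
        (succOf adj (keys.getD i 0)) s (fun _ h => h) hInv
    rw [List.foldl_cons]
    obtain ⟨c1, c2, c3, c4⟩ := ih _ his' d1
    refine ⟨c1, le_trans c2 d2, ?_, ?_⟩
    · intro hf
      obtain ⟨hc1, hc2⟩ := c3 hf
      have hs' : (innerB removed idx (s.1.getD i 0) (succOf adj (keys.getD i 0)) s).2 = false := by
        rw [hc1] at hf; exact hf
      obtain ⟨hd1, hd2⟩ := d3 hs'
      rw [hd1] at hc1 hc2 ⊢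
      refine ⟨hc1, ?_⟩
      intro i' hi' w hwsucc jn hjn
      rcases List.mem_cons.mp hi' with rfl | hi''
      · exact hd2 w hwsucc jn hjn
      · exact hc2 i' hi'' w hwsucc jn hjn
    · rintro ⟨h1, h2⟩
      by_cases hs' : (innerB removed idx (s.1.getD i 0) (succOf adj (keys.getD i 0)) s).2 = true
      · exact lt_of_le_of_lt c2 (d4 ⟨hs', h2⟩)
      · have hfalse : (innerB removed idx (s.1.getD i 0) (succOf adj (keys.getD i 0)) s).2 = false := by
          simpa using hs'
        obtain ⟨hd1, -⟩ := d3 hfalse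
        rw [hd1] at h1 c4 ⊢
        exact c4 ⟨h1, h2⟩

lemma passB_master (adj : List (Int × List Int)) (removed keys : List Int)
    (idx : PySem.Dict Int Int)
    (Hidx : ∀ w, idx.get? w = (PySem.List.index? keys w).map Int.ofNat)
    (hkr : ∀ x ∈ keys, x ∉ removed)
    (s : List Int × Bool) (hInv : InvL adj keys s.1) :
    InvL adj keys (passB adj removed keys idx s).1
    ∧ pot keys (passB adj removed keys idx s).1 ≤ pot keys s.1
    ∧ ((passB adj removed keys idx s).2 = false → passB adj removed keys idx s = s
        ∧ StableL adj keys s.1)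
    ∧ (((passB adj removed keys idx s).2 = true ∧ s.2 = false) →
        pot keys (passB adj removed keys idx s).1 < pot keys s.1) := by
  rw [passB_eq]
  obtain ⟨c1, c2, c3, c4⟩ :=
    passR_master adj removed keys idx Hidx hkr (List.range keys.length) s
      (fun i h => List.mem_range.mp h) hInv
  refine ⟨c1, c2, ?_, c4⟩
  intro hf
  obtain ⟨hc1, hc2⟩ := c3 hf
  exact ⟨hc1, fun i hi w hw jn hjn => hc2 i (List.mem_range.mpr hi) w hw jn hjn⟩


lemma loopB_fix (adj : List (Int × List Int)) (removed keys : List Int)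
    (idx : PySem.Dict Int Int)
    (Hidx : ∀ w, idx.get? w = (PySem.List.index? keys w).map Int.ofNat)
    (hkr : ∀ x ∈ keys, x ∉ removed) :
    ∀ (fuel : Nat) (lab : List Int), InvL adj keys lab → pot keys lab < fuel →
      InvL adj keys (loopB adj removed keys idx fuel lab)
      ∧ StableL adj keys (loopB adj removed keys idx fuel lab) := by
  intro fuel
  induction fuel with
  | zero => intro lab _ h; omega
  | succ fuel ih =>
    intro lab hInv hpot
    obtain ⟨c1, c2, c3, c4⟩ := passB_master adj removed keys idx Hidx hkr (lab, false) hInv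
    show InvL adj keys (if (passB adj removed keys idx (lab, false)).2
          then loopB adj removed keys idx fuel (passB adj removed keys idx (lab, false)).1
          else (passB adj removed keys idx (lab, false)).1)
      ∧ StableL adj keys (if (passB adj removed keys idx (lab, false)).2
          then loopB adj removed keys idx fuel (passB adj removed keys idx (lab, false)).1
          else (passB adj removed keys idx (lab, false)).1)
    cases hst : (passB adj removed keys idx (lab, false)).2 with
    | false =>
      rw [if_neg Bool.false_ne_true]
      obtain ⟨h1, h2⟩ := c3 hst
      rw [h1]
      exact ⟨hInv, h2⟩
    | true =>
      rw [if_pos rfl]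
      have hlt : pot keys (passB adj removed keys idx (lab, false)).1 < pot keys lab :=
        c4 ⟨hst, rfl⟩
      exact ih _ c1 (by omega)


lemma index?_getElem (keys : List Int) (h : keys.Nodup) (j : Nat) (hj : j < keys.length) :
    PySem.List.index? keys keys[j] = some j := by
  rw [PySem.List.index?_eq_idxOf?, List.idxOf?_eq_some_iff]
  refine ⟨hj, rfl, ?_⟩
  intro j' hj' heq
  have := (List.Nodup.getElem_inj_iff h).mp heq
  omega

lemma stable_down (adj : List (Int × List Int)) (keys lab : List Int)
    (hnd : keys.Nodup) (hst : StableL adj keys lab) :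
    ∀ {i j : Nat}, ReachK adj keys i j → lab.getD j 0 ≤ lab.getD i 0 := by
  intro i j h
  induction h with
  | refl => exact le_refl _
  | @tail b c h1 he ih =>
    obtain ⟨hk, hc, hsucc⟩ := he
    have hidx : PySem.List.index? keys (keys.getD c 0) = some c := by
      rw [List.getD_eq_getElem _ _ hc]
      exact index?_getElem keys hnd _ hc
    exact le_trans (hst b hk _ hsucc c hidx) ih

lemma lab_self_iff (adj : List (Int × List Int)) (keys lab : List Int)
    (hnd : keys.Nodup) (hInv : InvL adj keys lab) (hst : StableL adj keys lab)
    (j : Nat) (hj : j < keys.length) :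
    (lab.getD j 0 = (j : Int) ↔ ¬∃ i, i < j ∧ ReachK adj keys i j) := by
  constructor
  · intro hself
    rintro ⟨i, hij, hr⟩
    have h1 : lab.getD j 0 ≤ lab.getD i 0 := stable_down adj keys lab hnd hst hr
    obtain ⟨i1, -, hv1, hle1⟩ := hInv.2 i (by omega)
    rw [hself, hv1] at h1
    have : (j : Int) ≤ (i : Int) := le_trans h1 (by exact_mod_cast hle1)
    omega
  · intro hno
    obtain ⟨i0, hr0, hv0, hle0⟩ := hInv.2 j hj
    rcases lt_or_eq_of_le hle0 with hlt | heq
    · exact absurd ⟨i0, hlt, hr0⟩ hno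
    · rw [hv0, heq]




-- the two counts agree position by position
lemma count_corr (adj : List (Int × List Int)) (removed keys lab : List Int)
    (hnd : keys.Nodup) (hkr : ∀ x ∈ keys, x ∉ removed)
    (hkeys : ∀ x, x ∈ keys ↔ x ∈ adj.map Prod.fst ∧ x ∉ removed)
    (hInv : InvL adj keys lab) (hst : StableL adj keys lab) :
    ∀ (m k : Nat) (c : Int), k + m = keys.length →
      (List.range' k m).foldl
        (fun c i => if lab.getD i 0 == (i : Int) then c + 1 else c) c
      = c + countA adj removed (keys.take k) (keys.drop k) := by
  intro m
  induction m with
  | zero =>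
    intro k c hk
    have hkl : k = keys.length := by omega
    subst hkl
    rw [List.drop_length]
    rw [show countA adj removed (keys.take keys.length) [] = 0 from rfl]
    simp
  | succ m ih =>
    intro k c hk
    have hklt : k < keys.length := by omega
    have hdk : keys.drop k = keys[k] :: keys.drop (k + 1) :=
      List.drop_eq_getElem_cons hklt
    have ht : keys.take (k + 1) = keys.take k ++ [keys[k]] := by
      rw [List.take_add_one, List.getElem?_eq_getElem hklt]
      rfl
    have bridge : (∃ s ∈ keys.take k, Reach adj removed s keys[k])
        ↔ (∃ i, i < k ∧ ReachK adj keys i k) := by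
      constructor
      · rintro ⟨s, hs, hr⟩
        obtain ⟨i, hilt, hieq⟩ := List.mem_take_iff_getElem.mp hs
        have hmin := Nat.lt_min.mp hilt
        have hsk : s ∈ keys := hieq ▸ List.getElem_mem hmin.2
        have huk : keys[k] ∈ keys := List.getElem_mem hklt
        have h2 := reach_reachK adj removed keys hkeys s keys[k] hr hsk huk
        rw [← hieq, hnd.idxOf_getElem i hmin.2, hnd.idxOf_getElem k hklt] at h2
        exact ⟨i, hmin.1, h2⟩
      · rintro ⟨i, hik, hr⟩
        have hil : i < keys.length := by omega
        have hr2 := reachK_reach adj removed keys hkr hr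
        rw [List.getD_eq_getElem _ _ hil, List.getD_eq_getElem _ _ hklt] at hr2
        exact ⟨keys[i],
          List.mem_take_iff_getElem.mpr ⟨i, Nat.lt_min.mpr ⟨hik, hil⟩, rfl⟩, hr2⟩
    have hcnt : countA adj removed (keys.take k) (keys.drop k)
        = (@ite Int (∃ s ∈ keys.take k, Reach adj removed s keys[k])
            (Classical.propDecidable _) 0 1)
          + countA adj removed (keys.take k ++ [keys[k]]) (keys.drop (k + 1)) := by
      rw [hdk]; rfl
    have hgd : keys.getD k 0 = keys[k] := List.getD_eq_getElem _ _ hklt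
    rw [List.range'_succ, List.foldl_cons, hcnt, ← ht]
    by_cases hex : ∃ i, i < k ∧ ReachK adj keys i k
    · have hlab : ¬ (lab.getD k 0 = (k : Int)) := fun h =>
        ((lab_self_iff adj keys lab hnd hInv hst k hklt).mp h) hex
      have hcondb : (lab.getD k 0 == (k : Int)) = false := by
        simpa using hlab
      rw [if_neg (by rw [hcondb]; exact Bool.false_ne_true), if_pos (bridge.mpr hex)]
      rw [ih (k + 1) c (by omega)]
      ring
    · have hlab : lab.getD k 0 = (k : Int) :=
        (lab_self_iff adj keys lab hnd hInv hst k hklt).mpr hex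
      rw [if_pos (by rw [hlab]; exact beq_self_eq_true _),
        if_neg (fun hc => hex (bridge.mp hc))]
      rw [ih (k + 1) (c + 1) (by omega)]
      ring


-- B's port equals the positional count of stable self-labelled nodes
lemma portB_eq (adj : List (Int × List Int)) (removed : List Int) :
    components_after_removal_alt adj removed
      = countA adj removed [] (fresh removed (adj.map Prod.fst) []) := by
  obtain ⟨hks, hidx⟩ := keysIdx_char removed (adj.map Prod.fst) [] PySem.Dict.empty
    (by intro w; rw [PySem.Dict.get?_empty]; rfl)
  have hk1 : (keysIdx adj removed).1 = fresh removed (adj.map Prod.fst) [] := by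
    unfold keysIdx; rw [hks]; rfl
  have Hidx' : ∀ w, (keysIdx adj removed).2.get? w
      = (PySem.List.index? (fresh removed (adj.map Prod.fst) []) w).map Int.ofNat := by
    intro w
    have := hidx w
    rw [List.nil_append] at this
    exact this
  obtain ⟨hndfull, hmem⟩ := fresh_char removed (adj.map Prod.fst) [] List.nodup_nil
  set keys := fresh removed (adj.map Prod.fst) [] with hkd
  have hnd : keys.Nodup := by simpa using hndfull
  have hkeys : ∀ x, x ∈ keys ↔ x ∈ adj.map Prod.fst ∧ x ∉ removed := by
    intro x; rw [hmem x]; simp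
  have hkr : ∀ x ∈ keys, x ∉ removed := fun x hx => ((hkeys x).mp hx).2
  have halt0 : components_after_removal_alt adj removed
      = (PySem.List.pyRange 0 ((keysIdx adj removed).1.length : Int) 1).foldl
          (fun c i => if PySem.List.pyGetD
              (loopB adj removed (keysIdx adj removed).1 (keysIdx adj removed).2
                ((keysIdx adj removed).1.length * (keysIdx adj removed).1.length + 1)
                (PySem.List.pyRange 0 ((keysIdx adj removed).1.length : Int) 1)) i 0 == i
            then c + 1 else c) 0 := rfl
  rw [halt0, hk1]
  -- the initial labels 0,1,…,n-1
  have hlenr : (PySem.List.pyRange 0 (keys.length : Int) 1).length = keys.length := by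
    rw [PySem.List.length_pyRange_one]; omega
  have hentry : ∀ j < keys.length,
      (PySem.List.pyRange 0 (keys.length : Int) 1).getD j 0 = (j : Int) := by
    intro j hj
    rw [List.getD_eq_getElem _ _ (by rw [hlenr]; exact hj :
      j < (PySem.List.pyRange 0 (keys.length : Int) 1).length)]
    rw [PySem.List.getElem_pyRange_one]
    omega
  have hInv0 : InvL adj keys (PySem.List.pyRange 0 (keys.length : Int) 1) := by
    refine ⟨hlenr, ?_⟩
    intro j hj
    exact ⟨j, Relation.ReflTransGen.refl, hentry j hj, le_refl j⟩
  have hpot0 : pot keys (PySem.List.pyRange 0 (keys.length : Int) 1)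
      < keys.length * keys.length + 1 := by
    unfold pot
    have hb : ∀ i ∈ Finset.range keys.length,
        ((PySem.List.pyRange 0 (keys.length : Int) 1).getD i 0).toNat ≤ keys.length := by
      intro i hi
      rw [hentry i (Finset.mem_range.mp hi)]
      have := Finset.mem_range.mp hi
      omega
    have := Finset.sum_le_card_nsmul (Finset.range keys.length) _ keys.length hb
    simp only [Finset.card_range, smul_eq_mul] at this
    omega
  obtain ⟨hInvF, hstF⟩ := loopB_fix adj removed keys (keysIdx adj removed).2 Hidx' hkr
    (keys.length * keys.length + 1) (PySem.List.pyRange 0 (keys.length : Int) 1)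
    hInv0 hpot0
  set lab := loopB adj removed keys (keysIdx adj removed).2
    (keys.length * keys.length + 1) (PySem.List.pyRange 0 (keys.length : Int) 1) with hld
  -- convert the counting fold to a Nat-indexed fold and apply count_corr
  rw [PySem.List.pyRange_one, List.foldl_map]
  have h1 : ((keys.length : Int) - 0).toNat = keys.length := by omega
  rw [h1]
  have h2 : (List.range keys.length).foldl
      (fun (c : Int) (k : Nat) => if PySem.List.pyGetD lab (0 + (k : Int)) 0 == 0 + (k : Int)
        then c + 1 else c) 0
      = (List.range keys.length).foldl
        (fun (c : Int) (k : Nat) => if lab.getD k 0 == (k : Int) then c + 1 else c) 0 := by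
    apply PySem.List.foldl_congr_mem
    intro acc k hk
    rw [zero_add, PySem.List.pyGetD_natCast]
  rw [h2, List.range_eq_range']
  rw [count_corr adj removed keys lab hnd hkr hkeys hInvF hstF keys.length 0 0 (by omega)]
  simp


lemma ports_agree (adj : List (Int × List Int)) (removed : List Int) :
    components_after_removal adj removed = components_after_removal_alt adj removed := by
  rw [portA_eq, portB_eq]
  rw [foldA_dedup adj removed (adj.map Prod.fst) [] [] 0 (by intro x hx; cases hx)]
  rw [foldA_count adj removed (fresh removed (adj.map Prod.fst) []) [] [] 0
    (by intro x; constructor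
        · intro h; cases h
        · rintro ⟨s, hs, -⟩; cases hs)
    (by intro x hx; cases hx)]
  ring


-- ===== VERDICT (by name: the statement is the Claim_ definition above) =====
theorem components_after_removal_spec : Claim_equal_components_after_removal := by
  intro adj removed _ _
  unfold Spec_components_after_removal
  exact ports_agree adj removed
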